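-- pv_equiv track=rewrite | github.com/tamsinrogers/IdentifierSimilarity | code_snippets.py | func3_b
-- ===== SOURCE A (Python) =====
-- def func3_b(string):
--     words1 = ""
--     words2 = ""
--     # for each word in the string
--     for word in string.split():
--         if word[0] in ["a", "e", "i", "o", "u", "y"]:
--             words1 = words1 + word + " "
--         else:
--             words2 = words2 + word + " "
--
--     return words1, words2
-- ===== SOURCE B (Python) =====
-- def func3_b(string):
--     words = string.split()
--     words1 = ''.join(w + ' ' for w in words if w[0] in 'aeiouy')
--     words2 = ''.join(w + ' ' for w in words if w[0] not in 'aeiouy')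
--     return words1, words2
-- ===== Notes on version B (the rewrite author's own statement) =====
-- stated objective: idiomatic
-- what changed: Replaces the single if/else loop with mutable string += accumulators by one split() followed by two filtered comprehensions joined into the result strings.
import Mathlib
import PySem

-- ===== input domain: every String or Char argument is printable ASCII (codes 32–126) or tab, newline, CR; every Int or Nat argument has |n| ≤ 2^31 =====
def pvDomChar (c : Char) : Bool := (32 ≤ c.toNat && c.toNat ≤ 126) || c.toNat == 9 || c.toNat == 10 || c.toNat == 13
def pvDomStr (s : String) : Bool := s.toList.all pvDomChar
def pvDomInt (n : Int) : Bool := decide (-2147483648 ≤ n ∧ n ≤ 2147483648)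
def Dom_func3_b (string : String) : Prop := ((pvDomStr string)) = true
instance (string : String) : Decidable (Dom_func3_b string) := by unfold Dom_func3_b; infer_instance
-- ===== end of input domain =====

-- B replaces A's single if/else accumulation loop by split-once + two filtered comprehensions joined; idiomatic, same values.

-- ===== PORT A =====
-- word[0] is a one-char string in Python; ported as the first code point (pyGet?).
def pvVowelA (word : List Char) : Bool :=
  (PySem.Chars.pyGet? word 0).any (fun c => c ∈ ['a', 'e', 'i', 'o', 'u', 'y'])

def func3_b (string : String) : String × String :=
  let r := (PySem.Chars.split₀ string.toList).foldl
    (fun acc word =>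
      if pvVowelA word then (acc.1 ++ word ++ [' '], acc.2)
      else (acc.1, acc.2 ++ word ++ [' ']))
    ([], [])
  (String.ofList r.1, String.ofList r.2)

-- ===== PORT B =====
-- w[0] in 'aeiouy'
def pvVowelB (w : List Char) : Bool :=
  (PySem.Chars.pyGet? w 0).any (fun c => c ∈ ['a', 'e', 'i', 'o', 'u', 'y'])

def func3_b_alt (string : String) : String × String :=
  let words := PySem.Chars.split₀ string.toList
  let words1 := PySem.Chars.join [] ((words.filter (fun w => pvVowelB w)).map (fun w => w ++ [' ']))
  let words2 := PySem.Chars.join [] ((words.filter (fun w => !pvVowelB w)).map (fun w => w ++ [' ']))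
  (String.ofList words1, String.ofList words2)

-- ===== PRECONDITION & SPEC =====
def Spec_func3_b (string : String) (out : String × String) : Prop := out = func3_b_alt string
instance (string : String) (out : String × String) : Decidable (Spec_func3_b string out) := by unfold Spec_func3_b; infer_instance

-- ===== CLAIM (what is proved, stated in full; the proofs are below) =====
def Claim_equal_func3_b : Prop := ∀ (string : String), Dom_func3_b string → Spec_func3_b string (func3_b string)

-- ===== LEMMAS AND PROOFS =====

theorem pv_join_nil_eq_flatten (l : List (List Char)) :
    PySem.Chars.join [] l = l.flatten := by
  induction l with
  | nil => simp [PySem.Chars.join_nil]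
  | cons x xs ih =>
    cases xs with
    | nil => simp [PySem.Chars.join_singleton]
    | cons y r => simp [PySem.Chars.join_cons_cons, ih]

def pvStep (p : List Char → Bool) (acc : List Char × List Char) (w : List Char) :
    List Char × List Char :=
  if p w then (acc.1 ++ w ++ [' '], acc.2) else (acc.1, acc.2 ++ w ++ [' '])

theorem pv_partition_foldl (p : List Char → Bool) (ws : List (List Char)) :
    ∀ (a b : List Char),
      ws.foldl (pvStep p) (a, b)
      = (a ++ ((ws.filter (fun w => p w)).map (fun w => w ++ [' '])).flatten,
         b ++ ((ws.filter (fun w => !p w)).map (fun w => w ++ [' '])).flatten) := by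
  induction ws with
  | nil => intro a b; simp
  | cons w ws ih =>
    intro a b
    rw [List.foldl_cons]
    by_cases h : p w = true
    · rw [show pvStep p (a, b) w = (a ++ w ++ [' '], b) by simp [pvStep, h], ih]
      simp [h]
    · simp only [Bool.not_eq_true] at h
      rw [show pvStep p (a, b) w = (a, b ++ w ++ [' ']) by simp [pvStep, h], ih]
      simp [h]

-- ===== VERDICT (by name: the statement is the Claim_ definition above) =====
theorem func3_b_spec : Claim_equal_func3_b := by
  intro string _
  unfold Spec_func3_b func3_b func3_b_alt pvVowelB
  simp only [pv_join_nil_eq_flatten]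
  rw [show (fun (acc : List Char × List Char) word =>
        if pvVowelA word then (acc.1 ++ word ++ [' '], acc.2)
        else (acc.1, acc.2 ++ word ++ [' '])) = pvStep pvVowelA from rfl,
     pv_partition_foldl pvVowelA (PySem.Chars.split₀ string.toList) [] []]
  simp [pvVowelA]
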